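-- pv_equiv track=rewrite | github.com/awshaichen/aws-neuron-tensorflow | python/graph_util.py | most_popular_namescope
-- ===== SOURCE A (Python) =====
-- import collections
--
-- def most_popular_namescope(all_node_names):
--     all_splitted = [name.split('/') for name in all_node_names]
--     max_level = max(len(splitted) for splitted in all_splitted)
--     most_popular_namescope = []
--     max_popularity = 0
--     for lvl in range(max_level):
--         names = [splitted[lvl] for splitted in all_splitted if lvl < len(splitted)]
--         (scope, popularity), = collections.Counter(names).most_common(1)
--         if popularity >= max_popularity:
--             most_popular_namescope.append(scope)
--             max_popularity = popularity
--         else: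
--             break
--     return '/'.join(most_popular_namescope)
-- ===== SOURCE B (Python) =====
-- def most_popular_namescope(all_node_names):
--     # Recursive head/tail descent: instead of indexing the split lists by
--     # level, strip one token off the front of every surviving row at each
--     # step.  Each call counts the current heads, picks the first-maximal
--     # token (same tie-break as Counter.most_common(1)) and recurses on the
--     # tails while popularity does not drop.  Returns '' on the empty input
--     # list (where the original raises ValueError).
--     rows = [name.split('/') for name in all_node_names]
--     return '/'.join(_descend(rows, 0))
--
-- def _descend(rows, prev_pop):
--     if not rows:
--         return []
--     counts = {}
--     for row in rows:
--         counts[row[0]] = counts.get(row[0], 0) + 1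
--     scope, popularity = max(counts.items(), key=lambda kv: kv[1])
--     if popularity < prev_pop:
--         return []
--     return [scope] + _descend([row[1:] for row in rows if len(row) > 1], popularity)
-- ===== Notes on version B (the rewrite author's own statement) =====
-- stated objective: alternative
-- what changed: Replaces A's level-indexed loop (range over max_level, rescanning all_splitted at each level and building a fresh Counter) with a recursive head/tail descent that never indexes by level: each call counts the heads of the surviving rows, picks the first-maximal token via max(items, key=count), and recurses on the stripped tails while popularity does not drop; max_level is never computed.
-- crash fix: On the empty input list A raises ValueError (max() of an empty sequence) while B returns ''. — e.g. on most_popular_namescope([]): A raises ValueError, B returns ""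
import Mathlib
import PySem

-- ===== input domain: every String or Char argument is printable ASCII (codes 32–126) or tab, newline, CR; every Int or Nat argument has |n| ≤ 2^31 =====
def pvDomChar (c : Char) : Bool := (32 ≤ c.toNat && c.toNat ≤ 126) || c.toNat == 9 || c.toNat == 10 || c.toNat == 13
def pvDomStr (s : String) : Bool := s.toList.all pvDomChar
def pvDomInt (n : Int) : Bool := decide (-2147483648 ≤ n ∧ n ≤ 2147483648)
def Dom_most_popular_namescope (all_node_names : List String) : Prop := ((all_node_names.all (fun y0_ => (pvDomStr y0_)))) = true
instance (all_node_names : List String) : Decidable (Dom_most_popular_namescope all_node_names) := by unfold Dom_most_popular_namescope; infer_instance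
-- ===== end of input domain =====

-- B replaces A's level-indexed loop (range over max_level, rescanning all_splitted per level)
-- with a recursive head/tail descent over the rows of split names (alternative decomposition;
-- B returns "" on the empty list, where A raises ValueError).

-- ===== PORT A =====
-- name.split('/'): sep "/" is nonempty, so split? never returns none
def pvSplit (name : String) : List String := (PySem.Str.split? name "/").getD []

-- names at a level: [splitted[lvl] for splitted in all_splitted if lvl < len(splitted)]
def pvNamesAt (all_splitted : List (List String)) (lvl : Nat) : List String :=
  all_splitted.filterMap (fun s => s[lvl]?)

-- Counter(names).most_common(1): stable sort by count descending, take 1 =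
-- the FIRST item whose count is maximal ("" case unreachable: names nonempty under Pre_).
def pvMostCommon1 (items : List (String × Int)) : String × Int :=
  match items with
  | [] => ("", 0)
  | x :: rest => rest.foldl (fun best p => if p.2 > best.2 then p else best) x

def pvLoopA (all_splitted : List (List String)) : List Nat → List String → Int → List String
  | [], acc, _ => acc
  | lvl :: rest, acc, maxPop =>
    let sp := pvMostCommon1 (PySem.Dict.counter (pvNamesAt all_splitted lvl)).items
    if sp.2 ≥ maxPop then pvLoopA all_splitted rest (acc ++ [sp.1]) sp.2 else acc

def most_popular_namescope (all_node_names : List String) : String :=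
  let all_splitted := all_node_names.map (fun name => pvSplit name)
  match PySem.List.max? (all_splitted.map (fun s => (s.length : Int))) (fun x => x) with
  | none => ""  -- max() of an empty sequence: ValueError, excluded by Pre_
  | some maxLevel =>
      PySem.Str.join "/" (pvLoopA all_splitted (List.range maxLevel.toNat) [] 0)

-- ===== PORT B =====
-- max(counts.items(), key=lambda kv: kv[1]): first maximum ("" case unreachable: rows nonempty)
def pvMaxByCount (items : List (String × Int)) : String × Int :=
  match items with
  | [] => ("", 0)
  | x :: rest => rest.foldl (fun best p => if p.2 > best.2 then p else best) x

-- termination measure for the descent: stripped tails are strictly smaller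
theorem pvTailsMeasure_lt (r : List String) (rs : List (List String)) :
    ((((r :: rs).filterMap (fun row => if 1 < row.length then some (row.drop 1) else none)).map
        List.length).sum +
      ((r :: rs).filterMap (fun row => if 1 < row.length then some (row.drop 1) else none)).length) <
    (((r :: rs).map List.length).sum + (r :: rs).length) := by
  have key : ∀ rows : List (List String),
      (((rows.filterMap (fun row => if 1 < row.length then some (row.drop 1) else none)).map
          List.length).sum +
        (rows.filterMap (fun row => if 1 < row.length then some (row.drop 1) else none)).length) ≤
      (rows.map List.length).sum := by
    intro rows
    induction rows with
    | nil => simp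
    | cons x xs ih =>
      by_cases h : 1 < x.length
      · simp only [List.filterMap_cons, h, if_pos, List.map_cons, List.sum_cons, List.length_cons]
        simp only [List.length_drop]
        omega
      · simp only [List.filterMap_cons, if_neg h, List.map_cons, List.sum_cons]
        omega
  have := key (r :: rs)
  simp only [List.length_cons] at *
  omega

def pvDescend : List (List String) → Int → List String
  | [], _ => []
  | r :: rs, prevPop =>
    -- counts[row[0]] = counts.get(row[0], 0) + 1 over the rows (row[0]: rows are nonempty splits)
    let counts := (r :: rs).foldl
      (fun d row => d.insert (row.headD "") (d.getD (row.headD "") 0 + 1)) PySem.Dict.empty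
    let sp := pvMaxByCount counts.items
    if sp.2 < prevPop then []
    else sp.1 ::
      pvDescend ((r :: rs).filterMap (fun row => if 1 < row.length then some (row.drop 1) else none)) sp.2
termination_by rows _ => (rows.map List.length).sum + rows.length
decreasing_by exact pvTailsMeasure_lt r rs

def most_popular_namescope_alt (all_node_names : List String) : String :=
  PySem.Str.join "/" (pvDescend (all_node_names.map (fun name => pvSplit name)) 0)

-- ===== PRECONDITION & SPEC =====
-- Pre_ excludes only the empty list, on which A raises ValueError (max() of empty sequence).
def Pre_most_popular_namescope (all_node_names : List String) : Prop :=
  all_node_names ≠ []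
instance (all_node_names : List String) : Decidable (Pre_most_popular_namescope all_node_names) := by
  unfold Pre_most_popular_namescope; infer_instance

def pvWitness_most_popular_namescope : List String := ["a/b", "a/c"]

-- On the empty input list A raises ValueError (max() of an empty sequence) while B returns ''.
def Raises_most_popular_namescope (all_node_names : List String) : Prop :=
  all_node_names = []
instance (all_node_names : List String) : Decidable (Raises_most_popular_namescope all_node_names) := by
  unfold Raises_most_popular_namescope; infer_instance
def pvRaiseWitness_most_popular_namescope : List String := []
def pvRaiseWitnessOut_most_popular_namescope : String := ""

def Spec_most_popular_namescope (all_node_names : List String) (out : String) : Prop :=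
  out = most_popular_namescope_alt all_node_names
instance (all_node_names : List String) (out : String) : Decidable (Spec_most_popular_namescope all_node_names out) := by
  unfold Spec_most_popular_namescope; infer_instance

-- ===== CLAIM =====
def Claim_equal_most_popular_namescope : Prop := ∀ (all_node_names : List String), Dom_most_popular_namescope all_node_names → Pre_most_popular_namescope all_node_names → Spec_most_popular_namescope all_node_names (most_popular_namescope all_node_names)

def Claim_raises_most_popular_namescope : Prop := (∀ (all_node_names : List String), Dom_most_popular_namescope all_node_names → Raises_most_popular_namescope all_node_names → ¬ Pre_most_popular_namescope all_node_names) ∧ (Dom_most_popular_namescope (pvRaiseWitness_most_popular_namescope) ∧ Raises_most_popular_namescope (pvRaiseWitness_most_popular_namescope) ∧ most_popular_namescope_alt (pvRaiseWitness_most_popular_namescope) = pvRaiseWitnessOut_most_popular_namescope)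

-- ===== LEMMAS AND PROOFS =====

-- split('/') never returns the empty list
theorem pvSplitOnGo_len (sep : List Char) (fuel : Nat) : ∀ (l cur : List Char) (acc : List (List Char)),
    acc.length + 1 ≤ (PySem.Chars.splitOn.go sep fuel l cur acc).length := by
  induction fuel with
  | zero => intro l cur acc; simp [PySem.Chars.splitOn.go]
  | succ n ih =>
    intro l cur acc
    cases l with
    | nil => simp [PySem.Chars.splitOn.go]
    | cons c rest =>
      rw [PySem.Chars.splitOn.go]
      split
      · calc acc.length + 1 ≤ (cur.reverse :: acc).length + 1 := by simp
          _ ≤ _ := ih _ _ _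
      · exact ih _ _ _

theorem pvSplit_ne_nil (s : String) : pvSplit s ≠ [] := by
  unfold pvSplit
  simp only [PySem.Str.split?, PySem.Chars.split?, PySem.Chars.splitOn]
  intro h
  have h2 := pvSplitOnGo_len ['/'] (s.length + 1) s.toList [] []
  simp at h
  rw [h] at h2
  simp at h2

-- the rows surviving to level lvl, with their first lvl tokens stripped
def pvT (splits : List (List String)) (lvl : Nat) : List (List String) :=
  splits.filterMap (fun s => if lvl < s.length then some (s.drop lvl) else none)

theorem pvT_zero (splits : List (List String)) (h : ∀ s ∈ splits, s ≠ []) :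
    pvT splits 0 = splits := by
  induction splits with
  | nil => rfl
  | cons s ss ih =>
    have hs : 0 < s.length := List.length_pos_iff.mpr (h s (by simp))
    simp only [pvT, List.filterMap_cons, hs, if_pos, List.drop_zero]
    exact congrArg (s :: ·) (ih (fun x hx => h x (by simp [hx])))

theorem pvT_succ (splits : List (List String)) (lvl : Nat) :
    (pvT splits lvl).filterMap (fun row => if 1 < row.length then some (row.drop 1) else none) =
      pvT splits (lvl + 1) := by
  induction splits with
  | nil => rfl
  | cons s ss ih =>
    by_cases h : lvl < s.length
    · by_cases h1 : lvl + 1 < s.length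
      · have : 1 < (s.drop lvl).length := by simp [List.length_drop]; omega
        simp only [pvT, List.filterMap_cons, h, if_pos, h1, this, List.drop_drop]
        simpa [pvT] using congrArg (s.drop (lvl + 1) :: ·) ih
      · have : ¬ 1 < (s.drop lvl).length := by simp [List.length_drop]; omega
        simp only [pvT, List.filterMap_cons, h, if_pos, h1, this]
        simpa [pvT] using ih
    · have h1 : ¬ lvl + 1 < s.length := by omega
      simp only [pvT, List.filterMap_cons, h, h1]
      simpa [pvT] using ih

theorem pvT_heads (splits : List (List String)) (lvl : Nat) :
    (pvT splits lvl).map (fun row => row.headD "") = pvNamesAt splits lvl := by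
  induction splits with
  | nil => rfl
  | cons s ss ih =>
    by_cases h : lvl < s.length
    · have hg : s[lvl]? = some s[lvl] := List.getElem?_eq_getElem h
      have hh : (s.drop lvl).headD "" = s[lvl] := by
        rw [List.headD_eq_head?_getD, List.head?_drop, hg]; rfl
      simp only [pvT, pvNamesAt, List.filterMap_cons, h, if_pos, List.map_cons, hg, hh,
        List.cons.injEq, true_and]
      simpa [pvT, pvNamesAt] using ih
    · have hg : s[lvl]? = none := List.getElem?_eq_none_iff.mpr (by omega)
      simp only [pvT, pvNamesAt, List.filterMap_cons, h, hg]
      simpa [pvT, pvNamesAt] using ih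

theorem pvT_eq_nil_iff (splits : List (List String)) (lvl : Nat) :
    pvT splits lvl = [] ↔ ∀ s ∈ splits, s.length ≤ lvl := by
  unfold pvT
  rw [List.filterMap_eq_nil_iff]
  constructor
  · intro h s hs
    have := h s hs
    by_contra hlt
    simp [Nat.lt_of_not_le hlt] at this
  · intro h s hs
    simp [Nat.not_lt.mpr (h s hs)]

theorem pvFoldMax_le_iff (splits : List (List String)) (a lvl : Nat) :
    splits.foldl (fun n s => max n s.length) a ≤ lvl ↔ a ≤ lvl ∧ ∀ s ∈ splits, s.length ≤ lvl := by
  induction splits generalizing a with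
  | nil => simp
  | cons s ss ih =>
    simp only [List.foldl_cons, ih, List.mem_cons]
    constructor
    · rintro ⟨h1, h2⟩
      exact ⟨le_trans (le_max_left _ _) h1, fun x hx => by
        rcases hx with rfl | hx
        · exact le_trans (le_max_right _ _) h1
        · exact h2 x hx⟩
    · rintro ⟨h1, h2⟩
      exact ⟨max_le h1 (h2 s (Or.inl rfl)), fun x hx => h2 x (Or.inr hx)⟩

-- counts loop in B builds Counter of the heads
theorem pvCountsFold (rows : List (List String)) :
    ∀ d : PySem.Dict String Int,
    rows.foldl (fun d row => d.insert (row.headD "") (d.getD (row.headD "") 0 + 1)) d =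
      (rows.map (fun row => row.headD "")).foldl (fun d x => d.insert x (d.getD x 0 + 1)) d := by
  induction rows with
  | nil => intro d; rfl
  | cons r rs ih => intro d; simp only [List.foldl_cons, List.map_cons]; exact ih _

theorem pvCountsCounter (rows : List (List String)) :
    rows.foldl (fun d row => d.insert (row.headD "") (d.getD (row.headD "") 0 + 1))
        PySem.Dict.empty =
      PySem.Dict.counter (rows.map (fun row => row.headD "")) := by
  rw [pvCountsFold, PySem.Dict.foldl_insert_getD_add_one_eq_counter]

theorem pvIntFoldMax (l : List (List String)) (a : Nat) :
    (l.map (fun s => ((s.length : Int)))).foldl max (a : Int) =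
      ((l.foldl (fun n s => max n s.length) a : Nat) : Int) := by
  induction l generalizing a with
  | nil => rfl
  | cons s l ih => simpa [List.foldl_cons, Nat.cast_max] using ih (max a s.length)

theorem pvLoopA_eq_descend (splits : List (List String)) (k : Nat) :
    ∀ (lvl : Nat), lvl + k = splits.foldl (fun n s => max n s.length) 0 →
    ∀ (acc : List String) (mp : Int),
      pvLoopA splits (List.range' lvl k) acc mp = acc ++ pvDescend (pvT splits lvl) mp := by
  induction k with
  | zero =>
    intro lvl h acc mp
    have hnil : pvT splits lvl = [] := by
      rw [pvT_eq_nil_iff]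
      have := (pvFoldMax_le_iff splits 0 lvl).mp (by omega)
      exact this.2
    simp [pvLoopA, hnil, pvDescend]
  | succ k ih =>
    intro lvl h acc mp
    have hne : pvT splits lvl ≠ [] := by
      intro hnil
      have := (pvT_eq_nil_iff splits lvl).mp hnil
      have := (pvFoldMax_le_iff splits 0 lvl).mpr ⟨by omega, this⟩
      omega
    obtain ⟨r, rs, hT⟩ := List.exists_cons_of_ne_nil hne
    rw [List.range'_succ]
    simp only [pvLoopA]
    rw [hT]
    simp only [pvDescend]
    rw [pvCountsCounter, show (r :: rs).map (fun row => row.headD "") =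
      (pvT splits lvl).map (fun row => row.headD "") from by rw [hT], pvT_heads]
    have hmc : pvMaxByCount (PySem.Dict.counter (pvNamesAt splits lvl)).items =
        pvMostCommon1 (PySem.Dict.counter (pvNamesAt splits lvl)).items := rfl
    rw [hmc]
    set sp := pvMostCommon1 (PySem.Dict.counter (pvNamesAt splits lvl)).items with hsp
    have hnext : (r :: rs).filterMap (fun row => if 1 < row.length then some (row.drop 1) else none) =
        pvT splits (lvl + 1) := by rw [← hT]; exact pvT_succ splits lvl
    rw [hnext]
    by_cases hge : sp.2 ≥ mp
    · rw [if_pos hge, if_neg (by omega)]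
      rw [ih (lvl + 1) (by omega) (acc ++ [sp.1]) sp.2]
      simp
    · rw [if_neg hge, if_pos (by omega)]
      simp

theorem most_popular_namescope_spec : Claim_equal_most_popular_namescope := by
  intro ns _ hpre
  unfold Spec_most_popular_namescope most_popular_namescope most_popular_namescope_alt
  obtain ⟨n0, rest, rfl⟩ := List.exists_cons_of_ne_nil hpre
  simp only [List.map_cons]
  rw [PySem.List.max?_id_cons]
  have hfold := pvIntFoldMax (rest.map (fun name => pvSplit name)) (pvSplit n0).length
  simp only [hfold, Int.toNat_natCast]
  have hM : (rest.map (fun name => pvSplit name)).foldl (fun n s => max n s.length)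
      (pvSplit n0).length =
      (pvSplit n0 :: rest.map (fun name => pvSplit name)).foldl (fun n s => max n s.length) 0 := by
    simp [List.foldl_cons]
  rw [hM, List.range_eq_range']
  rw [pvLoopA_eq_descend (pvSplit n0 :: rest.map (fun name => pvSplit name)) _ 0 (by omega) [] 0]
  rw [pvT_zero]
  · simp
  · intro s hs
    simp only [List.mem_cons, List.mem_map] at hs
    rcases hs with rfl | ⟨name, _, rfl⟩
    · exact pvSplit_ne_nil n0
    · exact pvSplit_ne_nil name

def most_popular_namescope_raises : Claim_raises_most_popular_namescope := by
  unfold Claim_raises_most_popular_namescope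
  refine ⟨fun ns _ h hp => hp h, by decide, by decide, ?_⟩
  simp [most_popular_namescope_alt, pvRaiseWitness_most_popular_namescope,
    pvRaiseWitnessOut_most_popular_namescope, pvDescend, PySem.Str.join]
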